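-- pv_equiv track=rewrite | github.com/kmccleary3301/breadboard | agentic_coder_prototype/ctrees/phase13_floor_gate_iteration2.py | _count_comparisons
-- ===== SOURCE A (Python) =====
-- from typing import Any, Dict, Iterable, List
--
-- def _count_comparisons(rows: Iterable[Dict[str, Any]], field: str) -> Dict[str, int]:
--     wins = 0
--     losses = 0
--     ties = 0
--     for row in rows:
--         comparison = str((row.get(field) or {}).get("comparison") or "")
--         if comparison == "win":
--             wins += 1
--         elif comparison == "loss":
--             losses += 1
--         else:
--             ties += 1
--     return {"wins": wins, "losses": losses, "ties": ties}
-- ===== SOURCE B (Python) =====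
-- from typing import Any, Dict, Iterable
--
-- def _count_comparisons(rows: Iterable[Dict[str, Any]], field: str) -> Dict[str, int]:
--     comps = [str((row.get(field) or {}).get("comparison") or "") for row in rows]
--     wins = comps.count("win")
--     losses = comps.count("loss")
--     return {"wins": wins, "losses": losses, "ties": len(comps) - wins - losses}
-- ===== Notes on version B (the rewrite author's own statement) =====
-- stated objective: idiomatic
-- what changed: Replaced the per-row if/elif/else counting loop with a single extraction comprehension plus list.count for wins/losses and ties derived arithmetically as len - wins - losses.
import Mathlib
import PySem

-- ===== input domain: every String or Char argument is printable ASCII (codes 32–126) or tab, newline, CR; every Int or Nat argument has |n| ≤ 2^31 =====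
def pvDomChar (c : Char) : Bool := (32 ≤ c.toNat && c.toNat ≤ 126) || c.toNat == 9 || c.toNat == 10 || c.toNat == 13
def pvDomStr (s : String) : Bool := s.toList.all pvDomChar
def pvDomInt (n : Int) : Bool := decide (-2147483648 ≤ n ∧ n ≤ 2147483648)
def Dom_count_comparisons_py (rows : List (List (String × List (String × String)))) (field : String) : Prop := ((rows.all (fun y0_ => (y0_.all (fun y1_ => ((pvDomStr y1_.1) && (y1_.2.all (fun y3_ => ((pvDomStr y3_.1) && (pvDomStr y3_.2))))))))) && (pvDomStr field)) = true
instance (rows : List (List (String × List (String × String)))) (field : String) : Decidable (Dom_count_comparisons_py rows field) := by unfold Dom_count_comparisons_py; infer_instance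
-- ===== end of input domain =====

-- B replaces A's per-row if/elif/else counting loop by one extraction pass plus
-- list counts, with ties derived as length - wins - losses (idiomatic, same cost).


-- ===== PORT A =====
-- comparison = str((row.get(field) or {}).get("comparison") or "")
-- ('x or y' with falsy none/{}/"" collapses to getD: none and the empty
-- dict/string both yield the default; str(·) on a str is the identity)
def pvGetComparison (row : List (String × List (String × String))) (field : String) : String :=
  ((PySem.Dict.get? (PySem.Dict.mk ((PySem.Dict.get? (PySem.Dict.mk row) field).getD [])) "comparison").getD "")

def count_comparisons_py (rows : List (List (String × List (String × String)))) (field : String) : List (String × Int) :=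
  let r := rows.foldl (fun (st : Int × Int × Int) row =>
    let comparison := pvGetComparison row field
    if comparison = "win" then (st.1 + 1, st.2.1, st.2.2)
    else if comparison = "loss" then (st.1, st.2.1 + 1, st.2.2)
    else (st.1, st.2.1, st.2.2 + 1)) (0, 0, 0)
  [("wins", r.1), ("losses", r.2.1), ("ties", r.2.2)]

-- ===== PORT B =====
def count_comparisons_py_alt (rows : List (List (String × List (String × String)))) (field : String) : List (String × Int) :=
  let comps := rows.map (fun row => pvGetComparison row field)
  let wins : Int := PySem.List.count comps "win"
  let losses : Int := PySem.List.count comps "loss"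
  [("wins", wins), ("losses", losses), ("ties", (comps.length : Int) - wins - losses)]

-- ===== PRECONDITION & SPEC =====
def Spec_count_comparisons_py (rows : List (List (String × List (String × String)))) (field : String) (out : List (String × Int)) : Prop := out = count_comparisons_py_alt rows field
instance (rows : List (List (String × List (String × String)))) (field : String) (out : List (String × Int)) : Decidable (Spec_count_comparisons_py rows field out) := by unfold Spec_count_comparisons_py; infer_instance

-- ===== CLAIM (what is proved, stated in full; the proofs are below) =====
def Claim_equal_count_comparisons_py : Prop := ∀ (rows : List (List (String × List (String × String)))) (field : String), Dom_count_comparisons_py rows field → Spec_count_comparisons_py rows field (count_comparisons_py rows field)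

-- ===== LEMMAS AND PROOFS =====
-- A's fold adds, to each starting component, the number of "win"s, the number of
-- "loss"es, and the number of remaining rows respectively.
theorem pv_fold_counts (rows : List (List (String × List (String × String)))) (field : String) :
    ∀ (w l t : Int),
    rows.foldl (fun (st : Int × Int × Int) row =>
      let comparison := pvGetComparison row field
      if comparison = "win" then (st.1 + 1, st.2.1, st.2.2)
      else if comparison = "loss" then (st.1, st.2.1 + 1, st.2.2)
      else (st.1, st.2.1, st.2.2 + 1)) (w, l, t)
    = (w + ((rows.map (fun row => pvGetComparison row field)).count "win" : Int),
       l + ((rows.map (fun row => pvGetComparison row field)).count "loss" : Int),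
       t + (rows.length : Int)
         - ((rows.map (fun row => pvGetComparison row field)).count "win" : Int)
         - ((rows.map (fun row => pvGetComparison row field)).count "loss" : Int)) := by
  induction rows with
  | nil => intro w l t; simp
  | cons r rs ih =>
    intro w l t
    simp only [List.foldl_cons, List.map_cons, List.length_cons, List.count_cons]
    by_cases hw : pvGetComparison r field = "win"
    · simp only [hw, ih]
      simp
      omega
    · by_cases hl : pvGetComparison r field = "loss"
      · simp only [hl, ih]
        simp
        omega
      · simp only [if_neg hw, if_neg hl, ih]
        simp [hw, hl]
        omega

-- ===== VERDICT (by name: the statement is the Claim_ definition above) =====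
theorem count_comparisons_py_spec : Claim_equal_count_comparisons_py := by
  intro rows field _
  unfold Spec_count_comparisons_py count_comparisons_py count_comparisons_py_alt
  simp only [pv_fold_counts, PySem.List.count_eq, List.length_map]
  norm_num
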